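-- pv_equiv track=rewrite | github.com/BIONF/protTrace | prottrace/traceability/transform_alignment.py | calculate_indel_blocks
-- ===== SOURCE A (Python) =====
-- def calculate_indel_blocks(f):
--     indelBlocks = []
--
--     indelRows = []
--     for i in range(len(f[0])):
--         indelStart = False
--         for j in range(len(f)):
--             if f[j][i] == '-':
--                 if j not in indelRows:
--                     indelRows.append(j)
--                     indelStart = True
--             else:
--                 if j in indelRows:
--                     indelRows.remove(j)
--         if indelStart:
--             indelBlocks.append(i)
--
--     return indelBlocks
-- ===== SOURCE B (Python) =====
-- def calculate_indel_blocks(f):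
--     # Stateless: a gap newly starts at column i for row j iff f[j][i] == '-'
--     # and (i == 0 or f[j][i-1] != '-').  No cross-column indelRows bookkeeping.
--     return [i for i in range(len(f[0]))
--             if any(f[j][i] == '-' and (i == 0 or f[j][i - 1] != '-')
--                    for j in range(len(f)))]
-- ===== Notes on version B (the rewrite author's own statement) =====
-- stated objective: simpler
-- what changed: Replaced A's persistent cross-column indelRows state (with append/remove bookkeeping) by a stateless comprehension that tests each column locally against the previous column: a gap newly starts at (j,i) iff f[j][i]=='-' and (i==0 or f[j][i-1]!='-').
import Mathlib
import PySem

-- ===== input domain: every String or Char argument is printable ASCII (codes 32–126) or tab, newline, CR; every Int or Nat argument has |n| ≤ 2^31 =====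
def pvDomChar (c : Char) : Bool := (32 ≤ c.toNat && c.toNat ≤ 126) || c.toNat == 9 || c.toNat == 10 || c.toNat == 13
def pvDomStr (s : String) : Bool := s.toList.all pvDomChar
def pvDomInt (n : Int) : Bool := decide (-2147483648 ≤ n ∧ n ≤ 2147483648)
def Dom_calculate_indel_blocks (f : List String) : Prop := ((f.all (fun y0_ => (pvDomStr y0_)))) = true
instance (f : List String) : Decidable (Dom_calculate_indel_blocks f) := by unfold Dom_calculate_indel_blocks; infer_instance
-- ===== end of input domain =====

-- B replaces A's persistent cross-column indelRows state by a stateless local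
-- comparison of each column against the previous one (simpler decomposition).

-- shared indexing helper: f[j][i] (none = IndexError, excluded by Pre_)
def pvCharAt (f : List String) (j i : Int) : Option Char :=
  match PySem.List.pyGet? f j with
  | some s => PySem.Str.pyGet? s i
  | none => none

-- ===== PORT A =====
def calculate_indel_blocks (f : List String) : List Int :=
  ((PySem.List.pyRange 0 (PySem.Str.len ((PySem.List.pyGet? f 0).getD "")) 1).foldl
    (fun (st : List Int × List Int) i =>
      let inner := (PySem.List.pyRange 0 (f.length : Int) 1).foldl
        (fun (st2 : List Int × Bool) j =>
          if pvCharAt f j i == some '-' then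
            if j ∈ st2.1 then st2 else (st2.1 ++ [j], true)
          else
            if j ∈ st2.1 then ((PySem.List.remove? st2.1 j).getD st2.1, st2.2) else st2)
        (st.2, false)
      (if inner.2 then st.1 ++ [i] else st.1, inner.1))
    ([], [])).1

-- ===== PORT B =====
def calculate_indel_blocks_alt (f : List String) : List Int :=
  (PySem.List.pyRange 0 (PySem.Str.len ((PySem.List.pyGet? f 0).getD "")) 1).filter
    (fun i => (PySem.List.pyRange 0 (f.length : Int) 1).any
      (fun j => pvCharAt f j i == some '-' && (i == 0 || !(pvCharAt f j (i - 1) == some '-'))))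

-- ===== PRECONDITION & SPEC =====
-- Pre_ excludes exactly where Python A raises: f = [] (f[0] IndexError) and ragged
-- inputs whose later row is shorter than f[0] (f[j][i] IndexError).
def Pre_calculate_indel_blocks (f : List String) : Prop :=
  f ≠ [] ∧ ∀ s ∈ f, PySem.Str.len (f.headD "") ≤ PySem.Str.len s
instance (f : List String) : Decidable (Pre_calculate_indel_blocks f) := by
  unfold Pre_calculate_indel_blocks; infer_instance
def pvWitness_calculate_indel_blocks : List String := ["--a-", "a--b", "----"]
def Spec_calculate_indel_blocks (f : List String) (out : List Int) : Prop := out = calculate_indel_blocks_alt f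
instance (f : List String) (out : List Int) : Decidable (Spec_calculate_indel_blocks f out) := by unfold Spec_calculate_indel_blocks; infer_instance

-- ===== CLAIM (what is proved, stated in full; the proofs are below) =====
def Claim_equal_calculate_indel_blocks : Prop := ∀ (f : List String), Dom_calculate_indel_blocks f → Pre_calculate_indel_blocks f → Spec_calculate_indel_blocks f (calculate_indel_blocks f)

-- ===== LEMMAS AND PROOFS =====

-- congruence of List.any over the members (no Mathlib lemma takes the membership form)
lemma pv_any_congr {l : List Int} {p q : Int → Bool} (h : ∀ x ∈ l, p x = q x) :
    l.any p = l.any q := by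
  induction l with
  | nil => rfl
  | cons a l ih =>
    simp only [List.any_cons, h a (List.mem_cons_self)]
    rw [ih (fun x hx => h x (List.mem_cons_of_mem a hx))]

-- abbreviations for the proof
def pvGap (f : List String) (j i : Int) : Bool := pvCharAt f j i == some '-'

def pvInnerStep (f : List String) (i : Int) (st2 : List Int × Bool) (j : Int) : List Int × Bool :=
  if pvCharAt f j i == some '-' then
    if j ∈ st2.1 then st2 else (st2.1 ++ [j], true)
  else
    if j ∈ st2.1 then ((PySem.List.remove? st2.1 j).getD st2.1, st2.2) else st2

lemma pv_inner (f : List String) (i : Int) (js : List Int) (hnd : js.Nodup) :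
    ∀ (rows : List Int) (start : Bool), rows.Nodup →
    (js.foldl (pvInnerStep f i) (rows, start)).1.Nodup ∧
    (∀ k, k ∈ (js.foldl (pvInnerStep f i) (rows, start)).1 ↔
      (if k ∈ js then pvGap f k i = true else k ∈ rows)) ∧
    (js.foldl (pvInnerStep f i) (rows, start)).2 =
      (start || js.any (fun j => pvGap f j i && !(decide (j ∈ rows)))) := by
  induction js with
  | nil => intro rows start h; simp [h]
  | cons j js ih =>
    intro rows start hrows
    obtain ⟨hj, hnd'⟩ := List.nodup_cons.mp hnd
    by_cases hg : (pvCharAt f j i == some '-') = true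
    · by_cases hm : j ∈ rows
      · have hstep : pvInnerStep f i (rows, start) j = (rows, start) := by
          simp [pvInnerStep, hg, hm]
        rw [List.foldl_cons, hstep]
        have := ih hnd' rows start hrows
        refine ⟨this.1, fun k => ?_, ?_⟩
        · rw [this.2.1 k]
          by_cases hk : k = j
          · subst hk; simp [hj, hm, pvGap, hg]
          · by_cases hks : k ∈ js <;> simp [hks, hk]
        · rw [this.2.2]; simp [pvGap, hg, hm]
      · have hstep : pvInnerStep f i (rows, start) j = (rows ++ [j], true) := by
          simp [pvInnerStep, hg, hm]
        have hrows' : (rows ++ [j]).Nodup := by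
          simp [List.nodup_append, hrows]
          exact fun a ha h => hm (h ▸ ha)
        rw [List.foldl_cons, hstep]
        have := ih hnd' (rows ++ [j]) true hrows'
        refine ⟨this.1, fun k => ?_, ?_⟩
        · rw [this.2.1 k]
          by_cases hk : k = j
          · subst hk; simp [hj, pvGap, hg]
          · by_cases hks : k ∈ js <;> simp [hks, hk]
        · rw [this.2.2]; simp [pvGap, hg, hm]
    · by_cases hm : j ∈ rows
      · have hrem : (PySem.List.remove? rows j).getD rows = rows.erase j := by
          rw [PySem.List.remove?_eq_some_erase]
          · rfl
          · exact hm
        have hstep : pvInnerStep f i (rows, start) j = (rows.erase j, start) := by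
          simp [pvInnerStep, hg, hm, hrem]
        have hrows' : (rows.erase j).Nodup := hrows.erase j
        rw [List.foldl_cons, hstep]
        have := ih hnd' (rows.erase j) start hrows'
        refine ⟨this.1, fun k => ?_, ?_⟩
        · rw [this.2.1 k]
          by_cases hk : k = j
          · subst hk; simp [hj, hrows.not_mem_erase, pvGap, hg]
          · by_cases hks : k ∈ js <;>
              simp [hks, hk, List.mem_erase_of_ne hk]
        · rw [this.2.2]
          have hcong : ∀ x ∈ js, (pvGap f x i && !(decide (x ∈ rows.erase j))) =
              (pvGap f x i && !(decide (x ∈ rows))) := by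
            intro x hx
            have hxj : x ≠ j := fun h => hj (h ▸ hx)
            simp [List.mem_erase_of_ne hxj]
          rw [pv_any_congr hcong]
          simp [pvGap, hg]
      · have hstep : pvInnerStep f i (rows, start) j = (rows, start) := by
          simp [pvInnerStep, hg, hm]
        rw [List.foldl_cons, hstep]
        have := ih hnd' rows start hrows
        refine ⟨this.1, fun k => ?_, ?_⟩
        · rw [this.2.1 k]
          by_cases hk : k = j
          · subst hk; simp [hj, hm, pvGap, hg]
          · by_cases hks : k ∈ js <;> simp [hks, hk]
        · rw [this.2.2]; simp [pvGap, hg]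

def pvCondB (f : List String) (i : Int) : Bool :=
  (PySem.List.pyRange 0 (f.length : Int) 1).any
    (fun j => pvCharAt f j i == some '-' && (i == 0 || !(pvCharAt f j (i - 1) == some '-')))

def pvOuterStep (f : List String) (st : List Int × List Int) (i : Int) : List Int × List Int :=
  let inner := (PySem.List.pyRange 0 (f.length : Int) 1).foldl (pvInnerStep f i) (st.2, false)
  (if inner.2 then st.1 ++ [i] else st.1, inner.1)

lemma pv_outer (f : List String) (t : Nat) :
    ((PySem.List.pyRange 0 (t : Int) 1).foldl (pvOuterStep f) ([], [])).1 =
      (PySem.List.pyRange 0 (t : Int) 1).filter (pvCondB f) ∧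
    ((PySem.List.pyRange 0 (t : Int) 1).foldl (pvOuterStep f) ([], [])).2.Nodup ∧
    (∀ k, k ∈ ((PySem.List.pyRange 0 (t : Int) 1).foldl (pvOuterStep f) ([], [])).2 ↔
      (k ∈ PySem.List.pyRange 0 (f.length : Int) 1 ∧ 0 < t ∧ pvGap f k ((t : Int) - 1) = true)) := by
  induction t with
  | zero => simp [PySem.List.pyRange_one_eq_nil]
  | succ t ih =>
    have hsplit : PySem.List.pyRange 0 ((t + 1 : Nat) : Int) 1 =
        PySem.List.pyRange 0 (t : Int) 1 ++ [(t : Int)] := by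
      push_cast
      exact PySem.List.pyRange_one_succ_right (by positivity)
    rw [hsplit, List.foldl_append, List.filter_append]
    obtain ⟨h1, h2, h3⟩ := ih
    set st := (PySem.List.pyRange 0 (t : Int) 1).foldl (pvOuterStep f) ([], []) with hst
    have hin := pv_inner f (t : Int) (PySem.List.pyRange 0 (f.length : Int) 1)
      (PySem.List.nodup_pyRange_one 0 (f.length : Int)) st.2 false h2
    have hbool : ((PySem.List.pyRange 0 (f.length : Int) 1).foldl
        (pvInnerStep f (t : Int)) (st.2, false)).2 = pvCondB f (t : Int) := by
      rw [hin.2.2, Bool.false_or]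
      unfold pvCondB
      refine pv_any_congr (fun j hjmem => ?_)
      by_cases ht0 : t = 0
      · subst ht0
        have : j ∉ st.2 := fun hmem => by simpa using (h3 j).mp hmem
        simp [this, pvGap]
      · have hmem : j ∈ st.2 ↔ pvGap f j ((t : Int) - 1) = true := by
          rw [h3 j]
          simp [hjmem, Nat.pos_of_ne_zero ht0]
        have hne : ((t : Int) == 0) = false := by
          simp [ht0]
        rw [hne, Bool.false_or]
        by_cases hgprev : pvGap f j ((t : Int) - 1) = true
        · have hj2 : j ∈ st.2 := hmem.mpr hgprev
          simp [pvGap] at hgprev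
          simp [pvGap, hj2, hgprev]
        · have hj2 : j ∉ st.2 := fun h => hgprev (hmem.mp h)
          simp [pvGap] at hgprev
          simp [pvGap, hj2, hgprev]
    refine ⟨?_, hin.1, fun k => ?_⟩
    · simp only [List.foldl_cons, List.foldl_nil, pvOuterStep, hbool, h1,
        List.filter_cons, List.filter_nil]
      by_cases hc : pvCondB f (t : Int) = true <;> simp [hc]
    · simp only [List.foldl_cons, List.foldl_nil, pvOuterStep]
      rw [hin.2.1 k]
      by_cases hk : k ∈ PySem.List.pyRange 0 (f.length : Int) 1
      · simp only [hk, if_true, true_and]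
        constructor
        · intro h; exact ⟨Nat.succ_pos t, by push_cast; simpa using h⟩
        · intro h; have := h.2; push_cast at this; simpa using this
      · simp only [if_neg hk]
        rw [h3 k]
        simp [hk]

-- ===== VERDICT (by name: the statement is the Claim_ definition above) =====
theorem calculate_indel_blocks_spec : Claim_equal_calculate_indel_blocks := by
  intro f _ _
  unfold Spec_calculate_indel_blocks calculate_indel_blocks calculate_indel_blocks_alt
  have hn : 0 ≤ PySem.Str.len ((PySem.List.pyGet? f 0).getD "") := by
    simp [PySem.Str.len_eq]
  obtain ⟨t, ht⟩ := Int.eq_ofNat_of_zero_le hn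
  rw [ht]
  exact (pv_outer f t).1
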